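-- pv_equiv track=rewrite | github.com/jpdotcom/newtons-method | NewtonsMethodofCalculatingZereos.py | derivative_of_f
-- ===== SOURCE A (Python) =====
-- def derivative_of_f(x,n,equation_list):
--     coeficcient_counter=0
--     derivative_output=0
--     while n>=1:
--         derivative_output+=(n*(equation_list[coeficcient_counter])*(x**(n-1)))
--         n-=1
--         coeficcient_counter+=1
--     return derivative_output
-- ===== SOURCE B (Python) =====
-- def derivative_of_f(x, n, equation_list):
--     result = 0
--     for k in range(n):
--         result = result * x + (n - k) * equation_list[k]
--     return result
-- ===== Notes on version B (the rewrite author's own statement) =====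
-- stated objective: faster
-- what changed: Replaces the while-loop that recomputes x**(n-1-k) from scratch each iteration with a single Horner-scheme pass (result = result*x + coeff), removing all exponentiations.
import Mathlib
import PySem

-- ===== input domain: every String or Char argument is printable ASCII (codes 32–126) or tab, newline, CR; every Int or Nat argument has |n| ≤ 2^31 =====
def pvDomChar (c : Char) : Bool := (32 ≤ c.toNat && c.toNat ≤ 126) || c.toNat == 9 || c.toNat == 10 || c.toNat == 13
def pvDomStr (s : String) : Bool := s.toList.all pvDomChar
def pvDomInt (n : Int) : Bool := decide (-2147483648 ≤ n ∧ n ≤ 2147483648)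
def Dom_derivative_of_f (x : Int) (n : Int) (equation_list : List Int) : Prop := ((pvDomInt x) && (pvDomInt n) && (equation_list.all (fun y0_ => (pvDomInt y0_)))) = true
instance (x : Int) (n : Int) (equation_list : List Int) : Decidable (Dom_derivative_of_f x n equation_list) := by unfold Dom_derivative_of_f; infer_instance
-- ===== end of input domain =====

-- B evaluates the derivative by a single Horner pass (no exponentiations) instead of A's
-- while-loop that recomputes x**(n-1) afresh each iteration; objective: faster.

-- ===== PORT A =====
-- literal transliteration of A's while-loop: fuel = n.toNat (the loop runs while n >= 1),
-- state (n, coeficcient_counter, derivative_output); equation_list[c] via pyGetD (in range under Pre_)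
def derivative_of_f_go (x : Int) (eq : List Int) : Nat → Int → Int → Int → Int
  | 0, _, _, out => out
  | m + 1, n, c, out =>
      derivative_of_f_go x eq m (n - 1) (c + 1)
        (out + n * (PySem.List.pyGetD eq c 0) * x ^ (n - 1).toNat)

def derivative_of_f (x : Int) (n : Int) (equation_list : List Int) : Int :=
  derivative_of_f_go x equation_list n.toNat n 0 0

-- ===== PORT B =====
-- literal transliteration of Source B: fold of the Horner step over range(n)
def derivative_of_f_alt (x : Int) (n : Int) (equation_list : List Int) : Int :=
  (PySem.List.pyRange 0 n 1).foldl
    (fun result k => result * x + (n - k) * PySem.List.pyGetD equation_list k 0) 0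

-- ===== PRECONDITION & SPEC =====
-- Pre_ excludes exactly the inputs where Python A raises IndexError (1 ≤ n but fewer than n coefficients).
def Pre_derivative_of_f (x : Int) (n : Int) (equation_list : List Int) : Prop :=
  n ≤ (equation_list.length : Int) ∨ n < 1
instance (x : Int) (n : Int) (equation_list : List Int) : Decidable (Pre_derivative_of_f x n equation_list) := by unfold Pre_derivative_of_f; infer_instance

def pvWitness_derivative_of_f : Int × Int × List Int := (2, 3, [4, -1, 5])

def Spec_derivative_of_f (x : Int) (n : Int) (equation_list : List Int) (out : Int) : Prop := out = derivative_of_f_alt x n equation_list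
instance (x : Int) (n : Int) (equation_list : List Int) (out : Int) : Decidable (Spec_derivative_of_f x n equation_list out) := by unfold Spec_derivative_of_f; infer_instance

-- ===== CLAIM (what is proved, stated in full; the proofs are below) =====
def Claim_equal_derivative_of_f : Prop := ∀ (x : Int) (n : Int) (equation_list : List Int), Dom_derivative_of_f x n equation_list → Pre_derivative_of_f x n equation_list → Spec_derivative_of_f x n equation_list (derivative_of_f x n equation_list)

-- ===== LEMMAS AND PROOFS =====

-- A's loop characterised as an accumulated sum.
theorem derivative_of_f_go_eq (x : Int) (eq : List Int) :
    ∀ (m : Nat) (n c out : Int),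
      derivative_of_f_go x eq m n c out
        = out + ∑ j ∈ Finset.range m,
            (n - (j : Int)) * PySem.List.pyGetD eq (c + (j : Int)) 0 * x ^ (n - 1 - (j : Int)).toNat := by
  intro m
  induction m with
  | zero => intro n c out; simp [derivative_of_f_go]
  | succ m ih =>
      intro n c out
      rw [derivative_of_f_go, ih, Finset.sum_range_succ']
      have hterm : ∀ j ∈ Finset.range m,
          (n - 1 - (j : Int)) * PySem.List.pyGetD eq (c + 1 + (j : Int)) 0 * x ^ (n - 1 - 1 - (j : Int)).toNat
            = (n - ((j + 1 : Nat) : Int)) * PySem.List.pyGetD eq (c + ((j + 1 : Nat) : Int)) 0 * x ^ (n - 1 - ((j + 1 : Nat) : Int)).toNat := by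
        intro j _
        push_cast
        ring_nf
      rw [Finset.sum_congr rfl hterm]
      push_cast
      ring_nf
      have hc : ∀ (j : Int), 1 + j + c = 1 + c + j := by intro j; ring
      simp only [hc]

-- Horner fold characterised as the same sum (generalising the accumulator).
theorem horner_foldl_eq (x : Int) (a : Nat → Int) :
    ∀ (m : Nat) (r : Int),
      (List.range m).foldl (fun r k => r * x + a k) r
        = r * x ^ m + ∑ j ∈ Finset.range m, a j * x ^ (m - 1 - j) := by
  intro m
  induction m with
  | zero => intro r; simp
  | succ m ih =>
      intro r
      rw [List.range_succ, List.foldl_append, ih, Finset.sum_range_succ]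
      simp only [List.foldl_cons, List.foldl_nil]
      have h : (∑ j ∈ Finset.range m, a j * x ^ (m - 1 - j)) * x
          = ∑ j ∈ Finset.range m, a j * x ^ (m + 1 - 1 - j) := by
        rw [Finset.sum_mul]
        refine Finset.sum_congr rfl (fun j hj => ?_)
        have hj' : j < m := Finset.mem_range.mp hj
        rw [mul_assoc, ← pow_succ]
        congr 2
        omega
      have h0 : m + 1 - 1 - m = 0 := by omega
      rw [add_mul, h, h0, pow_zero, mul_one, pow_succ]
      ring

-- ===== VERDICT (by name: the statement is the Claim_ definition above) =====
theorem derivative_of_f_spec : Claim_equal_derivative_of_f := by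
  intro x n eq _ hpre
  unfold Spec_derivative_of_f derivative_of_f derivative_of_f_alt
  rw [PySem.List.pyRange_one]
  simp only [List.foldl_map]
  rw [derivative_of_f_go_eq, horner_foldl_eq]
  rw [show ((n : Int) - 0).toNat = n.toNat by omega]
  simp only [zero_add, zero_mul]
  refine Finset.sum_congr rfl (fun j hj => ?_)
  have hj' : j < n.toNat := Finset.mem_range.mp hj
  rw [show ((n - 1 - (j : Int)).toNat) = n.toNat - 1 - j from by omega]
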